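-- pv_equiv track=rewrite | github.com/bevynfernandes/AdaptiveUI | src/adaptiveui/modules/server.py | dict_compare
-- ===== SOURCE A (Python) =====
-- def dict_compare(d1: dict, d2: dict):
--     d1_keys = set(d1.keys())
--     d2_keys = set(d2.keys())
--     shared_keys = d1_keys & d2_keys
--     added = d1_keys - d2_keys
--     removed = d2_keys - d1_keys
--     modified = {o: (d1[o], d2[o]) for o in shared_keys if d1[o] != d2[o]}
--     same = shared_keys - modified.keys()
--     return added, removed, modified, same
-- ===== SOURCE B (Python) =====
-- def dict_compare(d1: dict, d2: dict):
--     added = set()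
--     same = set()
--     modified = {}
--     for k in d1:
--         if k not in d2:
--             added.add(k)
--         elif d1[k] != d2[k]:
--             modified[k] = (d1[k], d2[k])
--         else:
--             same.add(k)
--     removed = {k for k in d2 if k not in d1}
--     return added, removed, modified, same
-- ===== Notes on version B (the rewrite author's own statement) =====
-- stated objective: alternative
-- what changed: Replaces the set-algebra (key-set intersection/differences plus a comprehension over the shared set) by a single classification loop over d1 that sorts each key directly into added/modified/same, plus one scan of d2 for removed.
import Mathlib
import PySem

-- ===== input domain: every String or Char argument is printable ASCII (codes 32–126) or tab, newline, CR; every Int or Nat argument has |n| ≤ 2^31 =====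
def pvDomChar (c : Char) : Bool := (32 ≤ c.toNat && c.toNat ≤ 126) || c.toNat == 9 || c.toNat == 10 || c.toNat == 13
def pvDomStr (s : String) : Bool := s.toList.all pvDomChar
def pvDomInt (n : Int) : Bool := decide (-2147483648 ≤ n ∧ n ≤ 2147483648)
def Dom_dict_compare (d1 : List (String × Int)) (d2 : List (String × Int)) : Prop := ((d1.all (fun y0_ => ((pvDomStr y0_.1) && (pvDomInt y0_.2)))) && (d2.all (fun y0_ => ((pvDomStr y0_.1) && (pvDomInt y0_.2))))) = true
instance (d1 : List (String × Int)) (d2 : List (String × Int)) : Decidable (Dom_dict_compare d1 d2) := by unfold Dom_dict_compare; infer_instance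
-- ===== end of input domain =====

-- B replaces A's set algebra by one classification loop over d1 (added/modified/same) and one scan
-- of d2 (removed); same result, same order of growth (objective: alternative decomposition).
-- The 'modified' dict is returned as an item list; Python compares dicts ignoring item order.

-- ===== PORT A =====
-- helper of A's port: the dict comprehension '{o: (d1[o], d2[o]) for o in ks if d1[o] != d2[o]}'
-- (the match guards totalize the lookups d1[o]/d2[o]; on A's uses every key is present in both)
def pvModOf (D1 D2 : PySem.Dict String Int) (ks : List String) : PySem.Dict String (Int × Int) :=
  ks.foldl (fun m o =>
    match D1.get? o, D2.get? o with
    | some a, some b => if a ≠ b then m.insert o (a, b) else m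
    | _, _ => m) PySem.Dict.empty

def dict_compare (d1 : List (String × Int)) (d2 : List (String × Int)) :
    List String × List String × (List (String × Int × Int)) × List String :=
  let D1 : PySem.Dict String Int := PySem.Dict.mk d1
  let D2 : PySem.Dict String Int := PySem.Dict.mk d2
  let d1_keys : PySem.Set String := PySem.Set.ofList D1.keys
  let d2_keys : PySem.Set String := PySem.Set.ofList D2.keys
  let shared_keys := PySem.Set.inter d1_keys d2_keys
  let added := PySem.Set.diff d1_keys d2_keys
  let removed := PySem.Set.diff d2_keys d1_keys
  let modified := pvModOf D1 D2 shared_keys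
  let same := PySem.Set.diff shared_keys modified.keys
  (added, removed, modified.items.map (fun p => (p.1, p.2.1, p.2.2)), same)

-- ===== PORT B =====
-- helper of B's port: the body of 'for k in d1: …' (state = (added, modified, same))
def pvStep (D1 D2 : PySem.Dict String Int)
    (st : PySem.Set String × PySem.Dict String (Int × Int) × PySem.Set String) (k : String) :
    PySem.Set String × PySem.Dict String (Int × Int) × PySem.Set String :=
  if !(D2.contains k) then (PySem.Set.add st.1 k, st.2.1, st.2.2)
  else
    match D1.get? k, D2.get? k with      -- totalized d1[k]/d2[k]; both present in this branch
    | some a, some b =>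
        if a ≠ b then (st.1, st.2.1.insert k (a, b), st.2.2)
        else (st.1, st.2.1, PySem.Set.add st.2.2 k)
    | _, _ => st

def dict_compare_alt (d1 : List (String × Int)) (d2 : List (String × Int)) :
    List String × List String × (List (String × Int × Int)) × List String :=
  let D1 : PySem.Dict String Int := PySem.Dict.mk d1
  let D2 : PySem.Dict String Int := PySem.Dict.mk d2
  let st := D1.keys.foldl (pvStep D1 D2) (PySem.Set.empty, PySem.Dict.empty, PySem.Set.empty)
  let removed := D2.keys.foldl
    (fun s k => if D1.contains k then s else PySem.Set.add s k) PySem.Set.empty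
  (st.1, removed, st.2.1.items.map (fun p => (p.1, p.2.1, p.2.2)), st.2.2)

-- ===== PRECONDITION & SPEC =====
def Spec_dict_compare (d1 : List (String × Int)) (d2 : List (String × Int)) (out : List String × List String × (List (String × Int × Int)) × List String) : Prop := out = dict_compare_alt d1 d2
instance (d1 : List (String × Int)) (d2 : List (String × Int)) (out : List String × List String × (List (String × Int × Int)) × List String) : Decidable (Spec_dict_compare d1 d2 out) := by unfold Spec_dict_compare; infer_instance

-- ===== CLAIM (what is proved, stated in full; the proofs are below) =====
def Claim_equal_dict_compare : Prop := ∀ (d1 : List (String × Int)) (d2 : List (String × Int)), Dom_dict_compare d1 d2 → Spec_dict_compare d1 d2 (dict_compare d1 d2)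

-- ===== LEMMAS AND PROOFS =====

-- 'd1[k] != d2[k]' as a predicate on keys (both lookups present on all uses)
def pvDifferB (D1 D2 : PySem.Dict String Int) (k : String) : Bool :=
  match D1.get? k, D2.get? k with
  | some a, some b => a != b
  | _, _ => false

lemma pv_contains_ofList_keys (D : PySem.Dict String Int) (a : String) :
    PySem.Set.contains (PySem.Set.ofList D.keys) a = D.contains a := by
  rw [PySem.Dict.contains_eq_decide_mem_keys]
  by_cases h : a ∈ D.keys <;>
    simp [PySem.Set.contains_eq_listContains, h, PySem.Set.mem_ofList]

lemma pv_filter_snoc (x : String) (l : List String) (q : String → Bool) :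
    (PySem.Set.ofList (l ++ [x])).filter q =
      if x ∈ l then (PySem.Set.ofList l).filter q
      else (PySem.Set.ofList l).filter q ++ (if q x then [x] else []) := by
  rw [PySem.Set.ofList_append_singleton]
  by_cases h : x ∈ l
  · rw [PySem.Set.add_of_mem ((PySem.Set.mem_ofList _ _).mpr h)]
    simp [h]
  · rw [PySem.Set.add_of_not_mem (fun hc => h ((PySem.Set.mem_ofList _ _).mp hc))]
    simp only [h, List.filter_append, if_false]
    by_cases hq : q x = true <;> simp [hq]

lemma pv_foldl_add_filter (c : String → Bool) (l : List String) :
    l.foldl (fun s k => if c k then s else PySem.Set.add s k) PySem.Set.empty =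
      (PySem.Set.ofList l).filter (fun k => !c k) := by
  induction l using List.reverseRecOn with
  | nil => rfl
  | append_singleton l x ih =>
    rw [List.foldl_append, List.foldl_cons, List.foldl_nil, ih, pv_filter_snoc]
    by_cases h : x ∈ l
    · rw [if_pos h]
      by_cases hc : c x = true
      · rw [if_pos hc]
      · rw [if_neg hc]
        exact PySem.Set.add_of_mem (by simp [PySem.Set.mem_ofList, h, hc])
    · rw [if_neg h]
      by_cases hc : c x = true
      · simp [hc]
      · rw [if_neg hc]
        rw [PySem.Set.add_of_not_mem (by simp [PySem.Set.mem_ofList, h])]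
        simp [hc]

lemma pv_insert_eq_self_of_get? (d : PySem.Dict String (Int × Int)) (k : String) (v : Int × Int)
    (hn : d.keys.Nodup) (h : d.get? k = some v) : d.insert k v = d := by
  apply PySem.Dict.ext
  rw [PySem.Dict.items_insert_of_contains _ _ (by rw [PySem.Dict.contains_eq_isSome_get?, h]; rfl)]
  have hc : ∀ p ∈ d.items, (if (p.1 == k) = true then (k, v) else p) = p := by
    intro p hp
    by_cases hk : p.1 = k
    · have h2 := PySem.Dict.get?_of_mem_items _ (by exact (Prod.mk.eta (p := p)) ▸ hp) hn
      rw [hk, h] at h2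
      have hv : p.2 = v := by injection h2.symm
      have hpv : p = (k, v) := by rw [Prod.ext_iff]; exact ⟨hk, hv⟩
      simp [hpv]
    · simp [hk]
  rw [List.map_congr_left hc]
  simp

-- items of the comprehension over a duplicate-free key list
lemma pv_items_modOf (D1 D2 : PySem.Dict String Int) (ks : List String) (hn : ks.Nodup) :
    (pvModOf D1 D2 ks).items =
      (ks.filter (pvDifferB D1 D2)).map
        (fun k => (k, (D1.getD k 0, D2.getD k 0))) := by
  induction ks using List.reverseRecOn with
  | nil => rfl
  | append_singleton l x ih =>
    have hl : l.Nodup := (List.nodup_append.mp hn).1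
    have hx : x ∉ l := fun hc => (List.nodup_append.mp hn).2.2 x hc x (List.mem_singleton_self x) rfl
    have hitems := ih hl
    have hcont : (pvModOf D1 D2 l).contains x = false := by
      rw [PySem.Dict.contains_eq_decide_mem_keys, PySem.Dict.keys, hitems, List.map_map]
      simp only [decide_eq_false_iff_not, List.mem_map, Function.comp_apply, List.mem_filter,
        not_exists, not_and]
      intro k hk hkx
      exact hx (by rw [← hkx]; exact hk.1)
    have hstep : pvModOf D1 D2 (l ++ [x]) =
        match D1.get? x, D2.get? x with
        | some a, some b => if a ≠ b then (pvModOf D1 D2 l).insert x (a, b) else pvModOf D1 D2 l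
        | _, _ => pvModOf D1 D2 l := by
      simp only [pvModOf, List.foldl_append, List.foldl_cons, List.foldl_nil]
    rw [hstep, List.filter_append, List.map_append]
    rcases h1 : D1.get? x with _ | a <;> rcases h2 : D2.get? x with _ | b <;>
      simp only [h1, h2]
    · rw [hitems]; simp [pvDifferB, h1, h2]
    · rw [hitems]; simp [pvDifferB, h1, h2]
    · rw [hitems]; simp [pvDifferB, h1, h2]
    · by_cases hab : a = b
      · have hd : pvDifferB D1 D2 x = false := by unfold pvDifferB; rw [h1, h2]; simpa using hab
        simp only [hab, ne_eq, not_true_eq_false, if_false, ite_false]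
        rw [hitems]
        simp [hd]
      · have hd : pvDifferB D1 D2 x = true := by unfold pvDifferB; rw [h1, h2]; simpa using hab
        simp only [ne_eq, hab, not_false_eq_true, if_true, ite_true]
        rw [PySem.Dict.items_insert_of_not_contains _ _ hcont, hitems]
        simp [hd, PySem.Dict.getD_of_get?_eq_some _ _ h1, PySem.Dict.getD_of_get?_eq_some _ _ h2]

lemma pv_keys_modOf (D1 D2 : PySem.Dict String Int) (ks : List String) (hn : ks.Nodup) :
    (pvModOf D1 D2 ks).keys = ks.filter (pvDifferB D1 D2) := by
  rw [PySem.Dict.keys, pv_items_modOf _ _ _ hn, List.map_map]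
  have h : ((fun (x : String × Int × Int) => x.1) ∘ fun k => (k, (D1.getD k 0, D2.getD k 0))) = id := rfl
  rw [h, List.map_id]

-- reductions of one step of B's loop
lemma pvStep_added (D1 D2 : PySem.Dict String Int)
    (st : PySem.Set String × PySem.Dict String (Int × Int) × PySem.Set String) (k : String)
    (hp : D2.contains k = false) :
    pvStep D1 D2 st k = (PySem.Set.add st.1 k, st.2.1, st.2.2) := by
  unfold pvStep
  rw [hp]
  rfl

lemma pvStep_shared (D1 D2 : PySem.Dict String Int)
    (st : PySem.Set String × PySem.Dict String (Int × Int) × PySem.Set String) (k : String)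
    (a b : Int) (hp : D2.contains k = true) (h1 : D1.get? k = some a) (h2 : D2.get? k = some b) :
    pvStep D1 D2 st k =
      if a ≠ b then (st.1, st.2.1.insert k (a, b), st.2.2)
      else (st.1, st.2.1, PySem.Set.add st.2.2 k) := by
  unfold pvStep
  rw [hp, h1, h2]
  rfl

lemma pvModOf_snoc (D1 D2 : PySem.Dict String Int) (ks : List String) (x : String)
    (a b : Int) (h1 : D1.get? x = some a) (h2 : D2.get? x = some b) :
    pvModOf D1 D2 (ks ++ [x]) =
      if a ≠ b then (pvModOf D1 D2 ks).insert x (a, b) else pvModOf D1 D2 ks := by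
  unfold pvModOf
  rw [List.foldl_append, List.foldl_cons, List.foldl_nil]
  show (match D1.get? x, D2.get? x with
    | some a, some b => if a ≠ b then (pvModOf D1 D2 ks).insert x (a, b) else pvModOf D1 D2 ks
    | _, _ => pvModOf D1 D2 ks) = _
  rw [h1, h2]
  rfl

-- invariant of B's classification loop (the key list may contain duplicates)
lemma pv_b_loop_inv (D1 D2 : PySem.Dict String Int) (l : List String)
    (h : ∀ k ∈ l, (D1.get? k).isSome) :
    l.foldl (pvStep D1 D2) (PySem.Set.empty, PySem.Dict.empty, PySem.Set.empty) =
      ((PySem.Set.ofList l).filter (fun k => !(D2.contains k)),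
       pvModOf D1 D2 ((PySem.Set.ofList l).filter (fun k => D2.contains k)),
       (PySem.Set.ofList l).filter (fun k => D2.contains k && !(pvDifferB D1 D2 k))) := by
  induction l using List.reverseRecOn with
  | nil => rfl
  | append_singleton l x ih =>
    have hmem : ∀ k ∈ l, (D1.get? k).isSome := fun k hk => h k (by simp [hk])
    have e1 := pv_filter_snoc x l (fun k => !(D2.contains k))
    have e2 := pv_filter_snoc x l (fun k => D2.contains k)
    have e3 := pv_filter_snoc x l (fun k => D2.contains k && !(pvDifferB D1 D2 k))
    rw [List.foldl_append, List.foldl_cons, List.foldl_nil, ih hmem, e1, e2, e3]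
    obtain ⟨a, h1⟩ := Option.isSome_iff_exists.mp (h x (by simp))
    by_cases hm : x ∈ l
    · simp only [hm, if_true]
      by_cases hp : D2.contains x = true
      · obtain ⟨b, h2⟩ := Option.isSome_iff_exists.mp
          (show (D2.get? x).isSome = true by
            rw [← PySem.Dict.contains_eq_isSome_get?]; exact hp)
        rw [pvStep_shared D1 D2 _ x a b hp h1 h2]
        by_cases hab : a = b
        · have hd : pvDifferB D1 D2 x = false := by unfold pvDifferB; rw [h1, h2]; simpa using hab
          rw [if_neg (by simpa using hab)]
          rw [PySem.Set.add_of_mem (by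
            simp [List.mem_filter, PySem.Set.mem_ofList, hm, hp, hd])]
        · have hd : pvDifferB D1 D2 x = true := by unfold pvDifferB; rw [h1, h2]; simpa using hab
          rw [if_pos (by simpa using hab)]
          have hFn : ((PySem.Set.ofList l).filter (fun k => D2.contains k)).Nodup :=
            (PySem.Set.nodup_ofList l).filter _
          have hnk : (pvModOf D1 D2 ((PySem.Set.ofList l).filter (fun k => D2.contains k))).keys.Nodup := by
            rw [pv_keys_modOf _ _ _ hFn]; exact hFn.filter _
          have hget : (pvModOf D1 D2 ((PySem.Set.ofList l).filter (fun k => D2.contains k))).get? x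
              = some (a, b) := by
            apply PySem.Dict.get?_of_mem_items _ _ hnk
            rw [pv_items_modOf _ _ _ hFn]
            refine List.mem_map.mpr ⟨x, List.mem_filter.mpr ⟨?_, hd⟩, ?_⟩
            · simp [List.mem_filter, PySem.Set.mem_ofList, hm, hp]
            · rw [PySem.Dict.getD_of_get?_eq_some _ _ h1, PySem.Dict.getD_of_get?_eq_some _ _ h2]
          rw [pv_insert_eq_self_of_get? _ _ _ hnk hget]
      · rw [pvStep_added D1 D2 _ x (by simpa using hp)]
        rw [PySem.Set.add_of_mem (by
          simp [List.mem_filter, PySem.Set.mem_ofList, hm, hp])]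
    · simp only [hm, if_false]
      by_cases hp : D2.contains x = true
      · obtain ⟨b, h2⟩ := Option.isSome_iff_exists.mp
          (show (D2.get? x).isSome = true by
            rw [← PySem.Dict.contains_eq_isSome_get?]; exact hp)
        rw [pvStep_shared D1 D2 _ x a b hp h1 h2]
        by_cases hab : a = b
        · have hd : pvDifferB D1 D2 x = false := by unfold pvDifferB; rw [h1, h2]; simpa using hab
          rw [if_neg (by simpa using hab)]
          simp only [hp, hd, Bool.not_true, Bool.false_eq_true, if_false, Bool.not_false,
            Bool.and_true, if_true, List.append_nil, pvModOf_snoc D1 D2 _ x a b h1 h2]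
          rw [if_neg (by simpa using hab)]
          rw [PySem.Set.add_of_not_mem (by
            simp [List.mem_filter, PySem.Set.mem_ofList, hm])]
        · have hd : pvDifferB D1 D2 x = true := by unfold pvDifferB; rw [h1, h2]; simpa using hab
          rw [if_pos (by simpa using hab)]
          simp only [hp, hd, Bool.not_true, Bool.false_eq_true, if_false, Bool.and_false,
            if_true, List.append_nil, pvModOf_snoc D1 D2 _ x a b h1 h2]
          rw [if_pos (by simpa using hab)]
      · rw [pvStep_added D1 D2 _ x (by simpa using hp)]
        have hpf : D2.contains x = false := by simpa using hp
        simp only [hpf, Bool.not_false, if_true, Bool.false_eq_true, if_false, List.append_nil]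
        rw [PySem.Set.add_of_not_mem (by
          simp [List.mem_filter, PySem.Set.mem_ofList, hm])]
        simp

-- ===== VERDICT (by name: the statement is the Claim_ definition above) =====
theorem dict_compare_spec : Claim_equal_dict_compare := by
  intro d1 d2 _
  simp only [Spec_dict_compare, dict_compare, dict_compare_alt]
  have hcong1 : (fun x => !PySem.Set.contains (PySem.Set.ofList (PySem.Dict.mk d2).keys) x)
      = (fun x => !((PySem.Dict.mk d2).contains x)) :=
    funext fun a => by rw [pv_contains_ofList_keys]
  have hcong2 : (fun x => PySem.Set.contains (PySem.Set.ofList (PySem.Dict.mk d2).keys) x)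
      = (fun x => (PySem.Dict.mk d2).contains x) :=
    funext fun a => by rw [pv_contains_ofList_keys]
  have hcong3 : (fun x => !PySem.Set.contains (PySem.Set.ofList (PySem.Dict.mk d1).keys) x)
      = (fun x => !((PySem.Dict.mk d1).contains x)) :=
    funext fun a => by rw [pv_contains_ofList_keys]
  have hsome : ∀ k ∈ (PySem.Dict.mk d1).keys, ((PySem.Dict.mk d1).get? k).isSome := fun k hk => by
    rw [← PySem.Dict.contains_eq_isSome_get?]
    exact (PySem.Dict.contains_iff_mem_keys _ _).mpr hk
  rw [pv_b_loop_inv _ _ _ hsome, pv_foldl_add_filter]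
  simp only [PySem.Set.diff, PySem.Set.inter, hcong1, hcong2, hcong3]
  refine Prod.ext rfl (Prod.ext rfl (Prod.ext rfl ?_))
  -- the 'same' component
  have hFn : (((PySem.Set.ofList (PySem.Dict.mk d1).keys)).filter
      (fun k => (PySem.Dict.mk d2).contains k)).Nodup :=
    (PySem.Set.nodup_ofList _).filter _
  rw [pv_keys_modOf _ _ _ hFn, List.filter_filter]
  apply List.filter_congr
  intro a ha
  by_cases hp : (PySem.Dict.mk d2).contains a = true
  · by_cases hd : pvDifferB (PySem.Dict.mk d1) (PySem.Dict.mk d2) a = true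
    · have hm1 : ∃ v, (a, v) ∈ d1 := by
        have hk := (PySem.Set.mem_ofList _ _).mp ha
        simp only [PySem.Dict.keys, List.mem_map] at hk
        obtain ⟨p, hp1, hp2⟩ := hk
        exact ⟨p.2, by rw [← hp2, Prod.mk.eta]; exact hp1⟩
      have hm2 : ∃ v, (a, v) ∈ d2 := by
        have hk := (PySem.Dict.contains_iff_mem_keys _ _).mp hp
        simp only [PySem.Dict.keys, List.mem_map] at hk
        obtain ⟨p, hp1, hp2⟩ := hk
        exact ⟨p.2, by rw [← hp2, Prod.mk.eta]; exact hp1⟩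
      simp only [hp, hd, List.mem_filter, ha, Bool.and_true, Bool.not_true, Bool.true_and]
      simp [ha, hd, hp]
      exact ⟨hm1, hm2⟩
    · simp [hp, hd, List.mem_filter]
  · simp [hp]
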